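-- pv_equiv track=rewrite | github.com/Ropot171/codewars-1 | Tuples/task_6_tuples.py | create_unique_tuple_and_return_index
-- ===== SOURCE A (Python) =====
-- def create_unique_tuple_and_return_index(text):
--     items = text.split()
--     create_tuple = tuple(items)
--     counts = {}
--     result = []
--
--     for item in create_tuple:
--         counts[item] = counts.get(item, 0) + 1
--
--     for i, item in enumerate(create_tuple):
--         if counts[item] > 1:
--             result.append(str(i))
--
--     return ' '.join(result)
-- ===== SOURCE B (Python) =====
-- def create_unique_tuple_and_return_index(text):
--     positions = {}
--     for i, word in enumerate(text.split()):
--         positions.setdefault(word, []).append(i)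
--     results = []
--     for idxs in positions.values():
--         if len(idxs) > 1:
--             results.extend(idxs)
--     results.sort()
--     return ' '.join(str(i) for i in results)
-- ===== Notes on version B (the rewrite author's own statement) =====
-- stated objective: alternative
-- what changed: B replaces A's count-then-re-enumerate two-pass scheme by a single pass that groups indices per word in a dict, then collects the index lists of repeated words and sorts them numerically.
import Mathlib
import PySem

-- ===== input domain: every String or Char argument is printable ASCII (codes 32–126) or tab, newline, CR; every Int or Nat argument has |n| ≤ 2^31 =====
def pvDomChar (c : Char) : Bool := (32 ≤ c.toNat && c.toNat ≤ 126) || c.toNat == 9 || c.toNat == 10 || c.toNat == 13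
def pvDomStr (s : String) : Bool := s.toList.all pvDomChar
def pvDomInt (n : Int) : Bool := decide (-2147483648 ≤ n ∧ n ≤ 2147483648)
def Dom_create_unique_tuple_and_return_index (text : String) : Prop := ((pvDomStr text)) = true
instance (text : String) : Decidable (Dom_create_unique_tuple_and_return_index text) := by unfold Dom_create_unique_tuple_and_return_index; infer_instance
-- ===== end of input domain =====

-- B groups the indices per word in one dict pass and sorts the indices of repeated words,
-- instead of A's count pass followed by a second enumerate-and-test pass (objective: alternative).

-- ===== PORT A =====
def create_unique_tuple_and_return_index (text : String) : String :=
  let items := PySem.Str.split₀ text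
  let counts := items.foldl (fun d x => d.insert x (d.getD x 0 + 1)) (PySem.Dict.empty : PySem.Dict String Int)
  let result := (PySem.List.enumerate items 0).foldl
    (fun acc p => if 1 < counts.getD p.2 0 then acc ++ [PySem.Int.toStr p.1] else acc) []
  PySem.Str.join " " result

-- ===== PORT B =====
def create_unique_tuple_and_return_index_alt (text : String) : String :=
  let pos := (PySem.List.enumerate (PySem.Str.split₀ text) 0).foldl
    (fun d p => d.modify p.2 [] (fun l => l ++ [p.1])) (PySem.Dict.empty : PySem.Dict String (List Int))
  let results := pos.values.foldl
    (fun acc idxs => if 1 < idxs.length then acc ++ idxs else acc) ([] : List Int)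
  PySem.Str.join " " ((PySem.List.sorted results (fun x => x) false).map PySem.Int.toStr)

-- ===== PRECONDITION & SPEC =====
def Spec_create_unique_tuple_and_return_index (text : String) (out : String) : Prop := out = create_unique_tuple_and_return_index_alt text
instance (text : String) (out : String) : Decidable (Spec_create_unique_tuple_and_return_index text out) := by unfold Spec_create_unique_tuple_and_return_index; infer_instance

-- ===== CLAIM (what is proved, stated in full; the proofs are below) =====
def Claim_equal_create_unique_tuple_and_return_index : Prop := ∀ (text : String), Dom_create_unique_tuple_and_return_index text → Spec_create_unique_tuple_and_return_index text (create_unique_tuple_and_return_index text)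

-- ===== LEMMAS AND PROOFS =====

-- the grouping loop: per-key list of first components, in order
theorem pv_group_getD (l : List (Int × String)) (d : PySem.Dict String (List Int)) (w : String) :
    (l.foldl (fun d p => d.modify p.2 [] (fun l => l ++ [p.1])) d).getD w []
      = d.getD w [] ++ (l.filter (fun p => p.2 == w)).map (·.1) := by
  induction l generalizing d with
  | nil => simp
  | cons p t ih =>
    simp only [List.foldl_cons, List.filter_cons]
    rw [ih, PySem.Dict.getD_modify]
    by_cases h : w = p.2
    · simp [h]
    · have : ¬ (p.2 == w) = true := by simpa using fun hh => h hh.symm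
      simp [h, this]

-- 'for x in l: if c(x): out.extend(g(x))' is flatMap over the filtered list
theorem pv_foldl_extend_if {κ α : Type} (c : κ → Prop) [DecidablePred c] (g : κ → List α)
    (l : List κ) (acc : List α) :
    l.foldl (fun acc k => if c k then acc ++ g k else acc) acc
      = acc ++ (l.filter (fun k => decide (c k))).flatMap g := by
  induction l generalizing acc with
  | nil => simp
  | cons k t ih =>
    by_cases h : c k <;> simp [h, ih]

theorem pv_count_filter_key {α κ : Type} [DecidableEq α] [DecidableEq κ]
    (l : List α) (key : α → κ) (x : α) (k : κ) :
    (l.filter (fun y => decide (key y = k))).count x = if key x = k then l.count x else 0 := by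
  by_cases h : key x = k
  · rw [if_pos h, List.count_filter (by simp [h])]
  · rw [if_neg h]
    exact List.count_eq_zero_of_not_mem (fun hx => h (by simpa using (List.mem_filter.mp hx).2))

theorem pv_flatMap_singleton_map {α β : Type} (l : List α) (f : α → β) :
    l.flatMap (fun x => [f x]) = l.map f := by
  induction l with
  | nil => rfl
  | cons x t ih => simp [List.flatMap_cons, ih]

theorem pv_count_group {α κ : Type} [DecidableEq α] [DecidableEq κ]
    (l : List α) (key : α → κ) (ks : List κ) (hnd : ks.Nodup) (x : α) :
    (ks.flatMap (fun k => l.filter (fun y => decide (key y = k)))).count x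
      = if key x ∈ ks then l.count x else 0 := by
  induction ks with
  | nil => simp
  | cons k t ih =>
    simp only [List.flatMap_cons, List.count_append, List.mem_cons]
    rw [ih (List.nodup_cons.mp hnd).2, pv_count_filter_key]
    by_cases h : key x = k
    · subst h
      have ht : key x ∉ t := (List.nodup_cons.mp hnd).1
      simp [ht]
    · simp [h]

theorem pv_perm_group {α κ : Type} [DecidableEq α] [DecidableEq κ]
    (l : List α) (key : α → κ) (ks : List κ) (hnd : ks.Nodup)
    (hmem : ∀ x ∈ l, key x ∈ ks) :
    (ks.flatMap (fun k => l.filter (fun y => decide (key y = k)))).Perm l := by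
  rw [List.perm_iff_count]
  intro x
  rw [pv_count_group l key ks hnd x]
  by_cases h : key x ∈ ks
  · simp [h]
  · have : x ∉ l := fun hx => h (hmem x hx)
    simp [h, List.count_eq_zero_of_not_mem this]

-- ===== VERDICT (by name: the statement is the Claim_ definition above) =====
theorem create_unique_tuple_and_return_index_spec : Claim_equal_create_unique_tuple_and_return_index := by
  intro text _
  show create_unique_tuple_and_return_index text = create_unique_tuple_and_return_index_alt text
  unfold create_unique_tuple_and_return_index create_unique_tuple_and_return_index_alt
  set ws := PySem.Str.split₀ text with hws
  set E := PySem.List.enumerate ws 0 with hE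
  set P : Int × String → Prop := fun p => 1 < ws.count p.2 with hP
  -- ---- A side: the result list is a filtered map over the enumeration ----
  have hcounts : ws.foldl (fun d x => d.insert x (d.getD x 0 + 1)) (PySem.Dict.empty : PySem.Dict String Int)
      = PySem.Dict.counter ws := PySem.Dict.foldl_insert_getD_add_one_eq_counter ws
  have hAred : E.foldl (fun acc p => if 1 < (PySem.Dict.counter ws).getD p.2 0 then acc ++ [PySem.Int.toStr p.1] else acc) []
      = (E.filter (fun p => decide (P p))).map (fun p => PySem.Int.toStr p.1) := by
    rw [pv_foldl_extend_if (fun p => 1 < (PySem.Dict.counter ws).getD p.2 0)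
          (fun p => [PySem.Int.toStr p.1]) E [], List.nil_append]
    have hfc : E.filter (fun p => decide (1 < (PySem.Dict.counter ws).getD p.2 0))
        = E.filter (fun p => decide (P p)) := by
      apply List.filter_congr
      intro p _
      simp [PySem.Dict.getD_counter, hP]
    rw [hfc, pv_flatMap_singleton_map]
  -- ---- B side: the dict of index lists ----
  set pos := E.foldl (fun d p => d.modify p.2 [] (fun l => l ++ [p.1]))
      (PySem.Dict.empty : PySem.Dict String (List Int)) with hpos
  set grp : String → List Int := fun w => (E.filter (fun p => p.2 == w)).map (·.1) with hgrp
  have hmapsnd : List.map Prod.snd E = ws := by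
    rw [hE]; exact PySem.List.map_snd_enumerate ws 0
  have hgetD : ∀ w, pos.getD w [] = grp w := by
    intro w
    rw [hpos, pv_group_getD]
    simp [hgrp]
  have hkeys : pos.keys = PySem.Set.ofList ws := by
    rw [hpos, PySem.Dict.keys_foldl_modify_key]
    rw [PySem.Dict.keys_empty, PySem.Set.update_nil_left, hmapsnd]
  have hnodup : pos.keys.Nodup := by
    rw [hkeys]; exact PySem.Set.nodup_ofList ws
  have hvals : pos.values = pos.keys.map (fun k => pos.getD k []) :=
    PySem.Dict.values_eq_map_keys pos hnodup []
  have hlen : ∀ w, (grp w).length = ws.count w := by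
    intro w
    rw [hgrp]
    simp only [List.length_map, ← List.countP_eq_length_filter]
    rw [List.count_eq_countP, ← hmapsnd, List.countP_map]
    rfl
  -- the collected results list
  have hres : pos.values.foldl (fun acc idxs => if 1 < idxs.length then acc ++ idxs else acc) ([] : List Int)
      = ((PySem.Set.ofList ws).filter (fun k => decide (P (0, k)))).flatMap grp := by
    rw [hvals, List.foldl_map, hkeys]
    rw [pv_foldl_extend_if (fun k => 1 < (pos.getD k []).length) (fun k => pos.getD k []) _ []]
    rw [List.nil_append]
    have h1 : (PySem.Set.ofList ws).filter (fun k => decide (1 < (pos.getD k []).length))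
        = (PySem.Set.ofList ws).filter (fun k => decide (P (0, k))) := by
      apply List.filter_congr
      intro k _
      simp [hgetD, hlen, hP]
    rw [h1]
    exact List.flatMap_congr (fun k _ => hgetD k)
  -- the sorted collected list is exactly A's (increasing) index list
  have hsorted : PySem.List.sorted (((PySem.Set.ofList ws).filter (fun k => decide (P (0, k)))).flatMap grp) (fun x => x) false
      = (E.filter (fun p => decide (P p))).map (·.1) := by
    apply PySem.List.sorted_eq_of_perm_of_pairwise_lt
    · -- the grouped indices are a permutation of the filtered enumeration's indices
      have hperm := pv_perm_group (E.filter (fun p => decide (P p))) (·.2)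
        ((PySem.Set.ofList ws).filter (fun k => decide (P (0, k))))
        (List.Nodup.filter _ (PySem.Set.nodup_ofList ws))
        (by
          intro p hp
          rw [List.mem_filter]
          have hm := List.mem_filter.mp hp
          refine ⟨?_, by simpa [hP] using hm.2⟩
          rw [PySem.Set.mem_ofList, ← hmapsnd]
          exact List.mem_map_of_mem hm.1)
      have heq : ((PySem.Set.ofList ws).filter (fun k => decide (P (0, k)))).flatMap
            (fun k => (E.filter (fun p => decide (P p))).filter (fun y => decide (y.2 = k)))
          = ((PySem.Set.ofList ws).filter (fun k => decide (P (0, k)))).flatMap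
            (fun k => E.filter (fun p => p.2 == k)) := by
        apply List.flatMap_congr
        intro k hk
        rw [List.filter_filter]
        apply List.filter_congr
        intro p _
        have hkP : decide (P (0, k)) = true := (List.mem_filter.mp hk).2
        by_cases h : p.2 = k
        · subst h
          simp [hP] at hkP ⊢
          exact hkP
        · simp [fun hh => h (by simpa using hh)]
      have hmapped := hperm.map (fun x : Int × String => x.1)
      rw [heq, List.map_flatMap] at hmapped
      have hgrp' : (fun k => List.map (fun x : Int × String => x.1) (List.filter (fun p => p.2 == k) E)) = grp := by
        rw [hgrp]
      rw [hgrp'] at hmapped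
      exact hmapped.symm
    · rw [List.pairwise_map]
      exact (PySem.List.pairwise_lt_enumerate ws 0).filter _
  show PySem.Str.join " " (E.foldl (fun acc p => if 1 < ((ws.foldl (fun d x => d.insert x (d.getD x 0 + 1)) (PySem.Dict.empty : PySem.Dict String Int)).getD p.2 0) then acc ++ [PySem.Int.toStr p.1] else acc) [])
      = PySem.Str.join " " (List.map PySem.Int.toStr (PySem.List.sorted (pos.values.foldl (fun acc idxs => if 1 < idxs.length then acc ++ idxs else acc) ([] : List Int)) (fun x => x) false))
  rw [hcounts, hAred, hres, hsorted, List.map_map]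
  rfl
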